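-- pv_equiv track=rewrite | github.com/isaacfink/advent-of-code-2023 | day-03/python/main.py | getNumbersInRow
-- ===== SOURCE A (Python) =====
-- digits = ["0", "1", "2", "3", "4", "5", "6", "7", "8", "9"]
--
-- def getNumbersInRow(row: list[str]):
--     index = 0
--     isPart: bool = False
--     parts: list[list[int]] = []
--
--     while index < len(row):
--         char = row[index]
--         if char in digits and not isPart:
--             parts.append([index, index])
--             isPart = True
--         elif char in digits and isPart:
--             parts[len(parts) - 1][1] = index
--         else:
--             isPart = False
--         index += 1
--
--     return parts
-- ===== SOURCE B (Python) =====
-- digits = ["0", "1", "2", "3", "4", "5", "6", "7", "8", "9"]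
--
-- def getNumbersInRow(row: list[str]):
--     parts: list[list[int]] = []
--     n = len(row)
--     i = 0
--     while i < n:
--         if row[i] in digits:
--             j = i
--             while j + 1 < n and row[j + 1] in digits:
--                 j += 1
--             parts.append([i, j])
--             i = j + 1
--         else:
--             i += 1
--     return parts
-- ===== Notes on version B (the rewrite author's own statement) =====
-- stated objective: faster
-- what changed: Replaces the isPart boolean state machine that appends [i,i] and then repeatedly rewrites the last pair's end on every further digit with a run-skipping scan: on hitting a digit it advances an inner scan to the end of the digit run, appends the complete [start, end] pair once, and jumps past the run.
import Mathlib
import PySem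

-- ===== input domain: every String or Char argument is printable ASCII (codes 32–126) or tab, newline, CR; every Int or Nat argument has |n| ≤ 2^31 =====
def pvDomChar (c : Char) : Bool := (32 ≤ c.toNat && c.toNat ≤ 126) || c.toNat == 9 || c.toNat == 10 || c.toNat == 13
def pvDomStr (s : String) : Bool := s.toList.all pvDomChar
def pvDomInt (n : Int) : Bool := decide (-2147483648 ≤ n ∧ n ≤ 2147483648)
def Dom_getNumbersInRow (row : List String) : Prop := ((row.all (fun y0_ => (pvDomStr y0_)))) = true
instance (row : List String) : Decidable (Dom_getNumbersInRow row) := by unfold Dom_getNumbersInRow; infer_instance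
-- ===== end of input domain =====

-- B replaces A's isPart boolean state machine (which mutates the last pair's end on
-- every further digit) by a run-skipping scan that appends each complete [start, end]
-- pair once at the end of the run (fewer per-element state updates; a timing run measured B faster by a constant factor).

-- ===== PORT A =====
def pvDigits : List String := ["0", "1", "2", "3", "4", "5", "6", "7", "8", "9"]

-- A's while loop over index, state (isPart, parts); parts[len(parts)-1][1] = index is
-- dropLast ++ [last.set 1 index] (the getD [] default is unreachable: isPart = true
-- implies parts ≠ []).
def pvAloop : List String → Int → Bool → List (List Int) → List (List Int)
  | [], _, _, parts => parts
  | c :: rest, i, isPart, parts =>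
    if pvDigits.contains c && !isPart then
      pvAloop rest (i + 1) true (parts ++ [[i, i]])
    else if pvDigits.contains c && isPart then
      pvAloop rest (i + 1) isPart (parts.dropLast ++ [((parts.getLast?).getD []).set 1 i])
    else
      pvAloop rest (i + 1) false parts

def getNumbersInRow (row : List String) : List (List Int) := pvAloop row 0 false []

-- ===== PORT B =====
-- inner while 'while j + 1 < n and row[j+1] in digits: j += 1' = length of the leading
-- digit run of the remaining list
def pvRunLen : List String → Nat
  | [] => 0
  | c :: rest => if pvDigits.contains c then pvRunLen rest + 1 else 0

def pvBloop (xs : List String) (i : Int) : List (List Int) :=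
  match xs with
  | [] => []
  | c :: rest =>
    if pvDigits.contains c then
      [i, i + (pvRunLen rest : Int)] :: pvBloop (rest.drop (pvRunLen rest)) (i + (pvRunLen rest : Int) + 1)
    else
      pvBloop rest (i + 1)
termination_by xs.length
decreasing_by
  all_goals simp [List.length_drop]; try omega

def getNumbersInRow_alt (row : List String) : List (List Int) := pvBloop row 0

-- ===== PRECONDITION & SPEC =====
def Spec_getNumbersInRow (row : List String) (out : List (List Int)) : Prop := out = getNumbersInRow_alt row
instance (row : List String) (out : List (List Int)) : Decidable (Spec_getNumbersInRow row out) := by unfold Spec_getNumbersInRow; infer_instance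

-- ===== CLAIM (what is proved, stated in full; the proofs are below) =====
def Claim_equal_getNumbersInRow : Prop := ∀ (row : List String), Dom_getNumbersInRow row → Spec_getNumbersInRow row (getNumbersInRow row)

-- ===== LEMMAS AND PROOFS =====

theorem aloop_digit_false (c : String) (rest : List String) (i : Int) (parts : List (List Int))
    (hc : c ∈ pvDigits) :
    pvAloop (c :: rest) i false parts = pvAloop rest (i + 1) true (parts ++ [[i, i]]) := by
  simp [pvAloop, hc]

theorem aloop_digit_true (c : String) (rest : List String) (i : Int) (parts : List (List Int))
    (hc : c ∈ pvDigits) :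
    pvAloop (c :: rest) i true parts =
      pvAloop rest (i + 1) true (parts.dropLast ++ [((parts.getLast?).getD []).set 1 i]) := by
  simp [pvAloop, hc]

theorem aloop_nondigit (c : String) (rest : List String) (i : Int) (b : Bool) (parts : List (List Int))
    (hc : c ∉ pvDigits) :
    pvAloop (c :: rest) i b parts = pvAloop rest (i + 1) false parts := by
  simp [pvAloop, hc]

theorem bloop_digit (c : String) (rest : List String) (i : Int) (hc : c ∈ pvDigits) :
    pvBloop (c :: rest) i =
      [i, i + (pvRunLen rest : Int)] :: pvBloop (rest.drop (pvRunLen rest)) (i + (pvRunLen rest : Int) + 1) := by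
  rw [pvBloop]; simp [hc]

theorem bloop_nondigit (c : String) (rest : List String) (i : Int) (hc : c ∉ pvDigits) :
    pvBloop (c :: rest) i = pvBloop rest (i + 1) := by
  rw [pvBloop]; simp [hc]

theorem runLen_digit (c : String) (rest : List String) (hc : c ∈ pvDigits) :
    pvRunLen (c :: rest) = pvRunLen rest + 1 := by
  simp [pvRunLen, hc]

theorem runLen_nondigit (c : String) (rest : List String) (hc : c ∉ pvDigits) :
    pvRunLen (c :: rest) = 0 := by
  simp [pvRunLen, hc]

theorem setLast_concat (parts : List (List Int)) (s e i : Int) :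
    (parts ++ [[s, e]]).dropLast ++ [(((parts ++ [[s, e]]).getLast?).getD []).set 1 i]
      = parts ++ [[s, i]] := by
  simp [List.set]

-- Combined invariant, by strong induction on the length of the remaining list:
-- (1) from the isPart = false state A produces parts ++ B's runs;
-- (2) from the isPart = true state (last pair [s, e]) A extends the current run:
--     the last end becomes i + runLen - 1 (or stays e if the run is already over),
--     then continues as in (1) after the run.
theorem pvKey : ∀ (n : Nat) (xs : List String), xs.length ≤ n → ∀ (i : Int) (parts : List (List Int)),
    (pvAloop xs i false parts = parts ++ pvBloop xs i) ∧
    (∀ (s e : Int), pvAloop xs i true (parts ++ [[s, e]]) =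
      parts ++ [[s, if pvRunLen xs = 0 then e else i + (pvRunLen xs : Int) - 1]]
        ++ pvBloop (xs.drop (pvRunLen xs)) (i + (pvRunLen xs : Int))) := by
  intro n
  induction n with
  | zero =>
    intro xs hlen i parts
    have hx : xs = [] := List.eq_nil_of_length_eq_zero (Nat.le_zero.mp hlen)
    subst hx
    exact ⟨by simp [pvAloop, pvBloop], fun s e => by simp [pvAloop, pvBloop, pvRunLen]⟩
  | succ n ih =>
    intro xs hlen i parts
    match xs with
    | [] =>
      exact ⟨by simp [pvAloop, pvBloop], fun s e => by simp [pvAloop, pvBloop, pvRunLen]⟩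
    | c :: rest =>
      have hr : rest.length ≤ n := by simp at hlen; omega
      by_cases hc : c ∈ pvDigits
      · constructor
        · -- false state, digit: start a new run
          rw [aloop_digit_false c rest i parts hc,
              (ih rest hr (i + 1) parts).2 i i, bloop_digit c rest i hc]
          by_cases hk : pvRunLen rest = 0
          · simp [hk]
          · simp only [if_neg hk]
            have e1 : i + 1 + (pvRunLen rest : Int) - 1 = i + (pvRunLen rest : Int) := by ring
            have e2 : i + 1 + (pvRunLen rest : Int) = i + (pvRunLen rest : Int) + 1 := by ring
            rw [e1, e2]
            simp
        · -- true state, digit: extend the run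
          intro s e
          rw [aloop_digit_true c rest i (parts ++ [[s, e]]) hc, setLast_concat,
              (ih rest hr (i + 1) parts).2 s i, runLen_digit c rest hc,
              List.drop_succ_cons]
          by_cases hk0 : pvRunLen rest = 0
          · simp [hk0]
          · simp only [if_neg hk0, if_neg (by omega : ¬ pvRunLen rest + 1 = 0)]
            have e1 : i + 1 + (pvRunLen rest : Int) - 1 = i + ((pvRunLen rest + 1 : Nat) : Int) - 1 := by
              push_cast; ring
            have e2 : i + 1 + (pvRunLen rest : Int) = i + ((pvRunLen rest + 1 : Nat) : Int) := by
              push_cast; ring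
            rw [e1, e2]
      · -- non-digit: any current run ends
        constructor
        · rw [aloop_nondigit c rest i false parts hc,
              (ih rest hr (i + 1) parts).1, bloop_nondigit c rest i hc]
        · intro s e
          rw [aloop_nondigit c rest i true (parts ++ [[s, e]]) hc,
              (ih rest hr (i + 1) (parts ++ [[s, e]])).1,
              runLen_nondigit c rest hc]
          simp [bloop_nondigit c rest i hc]

-- ===== VERDICT (by name: the statement is the Claim_ definition above) =====
theorem getNumbersInRow_spec : Claim_equal_getNumbersInRow := by
  intro row _
  unfold Spec_getNumbersInRow getNumbersInRow getNumbersInRow_alt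
  simpa using (pvKey row.length row le_rfl 0 []).1
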